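-- pv_equiv track=rewrite | github.com/tomdom35/Daily-Programmer-Challenges | June 24, 2015 - Intermediate - Go Game.py | findRemovalPoint
-- ===== SOURCE A (Python) =====
-- def findRemovalPoint(groups, groupSpaces):
--     largestGroup = 0
--     removalPoint = (-1,-1)
--     for index in range(0,len(groups)):
--         if(len(groupSpaces[index]) == 1 and len(groups[index])>largestGroup):
--             removalPoint = (groupSpaces[index][0][1],groupSpaces[index][0][0])
--             largestGroup = len(groups[index])
--     return removalPoint
-- ===== SOURCE B (Python) =====
-- def findRemovalPoint(groups, groupSpaces):
--     # pair each group with its single liberty, drop empty groups, rank by size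
--     candidates = [(g, s[0]) for g, s in zip(groups, groupSpaces)
--                   if len(s) == 1 and g]
--     ranked = sorted(candidates, key=lambda t: -len(t[0]))
--     if not ranked:
--         return (-1, -1)
--     r, c = ranked[0][1]
--     return (c, r)
-- ===== Notes on version B (the rewrite author's own statement) =====
-- stated objective: alternative
-- what changed: Replaces A's indexed running-best loop with a pipeline: zip groups with their spaces, filter the single-liberty nonempty groups into (group, liberty) pairs, stable-sort them descending by group size, and take the head (stability reproduces A's first-on-tie choice).
import Mathlib
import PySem

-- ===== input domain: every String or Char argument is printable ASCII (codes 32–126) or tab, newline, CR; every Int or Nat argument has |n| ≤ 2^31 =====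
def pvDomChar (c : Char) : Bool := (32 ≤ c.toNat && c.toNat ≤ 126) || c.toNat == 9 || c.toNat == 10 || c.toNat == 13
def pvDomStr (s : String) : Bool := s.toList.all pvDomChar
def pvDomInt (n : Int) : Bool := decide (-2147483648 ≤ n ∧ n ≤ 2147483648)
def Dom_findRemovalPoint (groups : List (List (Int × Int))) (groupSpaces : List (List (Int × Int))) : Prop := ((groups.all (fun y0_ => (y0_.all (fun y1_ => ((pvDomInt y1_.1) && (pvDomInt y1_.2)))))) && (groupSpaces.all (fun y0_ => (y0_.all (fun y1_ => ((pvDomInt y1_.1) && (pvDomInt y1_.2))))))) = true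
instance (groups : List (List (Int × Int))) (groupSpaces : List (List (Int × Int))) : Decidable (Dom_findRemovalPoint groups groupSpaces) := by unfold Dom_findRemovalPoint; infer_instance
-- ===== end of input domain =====

-- B replaces A's indexed running-best loop by zip → filter → stable sort by descending size → head (objective: alternative).

-- ===== PORT A =====
-- literal port of A's loop: state (largestGroup, removalPoint); indexing via pyGetD
-- (exact under Pre_, which guarantees every groupSpaces[index] access is in range)
def findRemovalPoint (groups : List (List (Int × Int))) (groupSpaces : List (List (Int × Int))) : Int × Int :=
  (((PySem.List.pyRange 0 (groups.length : Int) 1).foldl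
    (fun (st : Int × (Int × Int)) index =>
      let sp := PySem.List.pyGetD groupSpaces index []
      let g := PySem.List.pyGetD groups index []
      if sp.length = 1 ∧ st.1 < (g.length : Int) then
        ((g.length : Int), ((sp.getD 0 (0, 0)).2, (sp.getD 0 (0, 0)).1))
      else st)
    (0, (-1, -1))).2)

-- ===== PORT B =====
def findRemovalPoint_alt (groups : List (List (Int × Int))) (groupSpaces : List (List (Int × Int))) : Int × Int :=
  let candidates := ((groups.zip groupSpaces).filter
      (fun p => p.2.length == 1 && !p.1.isEmpty)).map (fun p => (p.1, p.2.getD 0 (0, 0)))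
  let ranked := PySem.List.sorted candidates (fun t => -(t.1.length : Int))
  match ranked with
  | [] => (-1, -1)
  | t :: _ => (t.2.2, t.2.1)

-- ===== PRECONDITION & SPEC =====
-- Python A raises IndexError on groupSpaces[index] when groupSpaces is shorter than groups.
def Pre_findRemovalPoint (groups : List (List (Int × Int))) (groupSpaces : List (List (Int × Int))) : Prop :=
  groups.length ≤ groupSpaces.length
instance (groups : List (List (Int × Int))) (groupSpaces : List (List (Int × Int))) : Decidable (Pre_findRemovalPoint groups groupSpaces) := by unfold Pre_findRemovalPoint; infer_instance
def pvWitness_findRemovalPoint : (List (List (Int × Int))) × (List (List (Int × Int))) :=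
  ([[(0, 0), (0, 1)], [(2, 2)]], [[(1, 2)], [(3, 4), (5, 6)]])
def Spec_findRemovalPoint (groups : List (List (Int × Int))) (groupSpaces : List (List (Int × Int))) (out : Int × Int) : Prop := out = findRemovalPoint_alt groups groupSpaces
instance (groups : List (List (Int × Int))) (groupSpaces : List (List (Int × Int))) (out : Int × Int) : Decidable (Spec_findRemovalPoint groups groupSpaces out) := by unfold Spec_findRemovalPoint; infer_instance

-- ===== CLAIM (what is proved, stated in full; the proofs are below) =====
def Claim_equal_findRemovalPoint : Prop := ∀ (groups : List (List (Int × Int))) (groupSpaces : List (List (Int × Int))), Dom_findRemovalPoint groups groupSpaces → Pre_findRemovalPoint groups groupSpaces → Spec_findRemovalPoint groups groupSpaces (findRemovalPoint groups groupSpaces)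

-- ===== LEMMAS AND PROOFS =====

-- A's loop body over a Nat index
def pvStepA (groups groupSpaces : List (List (Int × Int))) (st : Int × (Int × Int)) (i : Nat) : Int × (Int × Int) :=
  let sp := groupSpaces.getD i []
  let g := groups.getD i []
  if sp.length = 1 ∧ st.1 < (g.length : Int) then
    ((g.length : Int), ((sp.getD 0 (0, 0)).2, (sp.getD 0 (0, 0)).1))
  else st

-- A's loop body on a candidate (group, liberty) pair
def pvStepP (st : Int × (Int × Int)) (x : (List (Int × Int)) × (Int × Int)) : Int × (Int × Int) :=
  if st.1 < (x.1.length : Int) then ((x.1.length : Int), (x.2.2, x.2.1)) else st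

-- the running first-maximal pair (what stability of B's sort selects)
def pvBest (c : (List (Int × Int)) × (Int × Int)) (cs : List ((List (Int × Int)) × (Int × Int))) :
    (List (Int × Int)) × (Int × Int) :=
  cs.foldl (fun h x => if h.1.length < x.1.length then x else h) c

def pvCandB (p : (List (Int × Int)) × (List (Int × Int))) : Bool :=
  p.2.length == 1 && !p.1.isEmpty

def pvMk (p : (List (Int × Int)) × (List (Int × Int))) : (List (Int × Int)) × (Int × Int) :=
  (p.1, p.2.getD 0 (0, 0))

lemma pv_zip_eq_range_map (groups : List (List (Int × Int))) :
    ∀ groupSpaces : List (List (Int × Int)), groups.length ≤ groupSpaces.length →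
      groups.zip groupSpaces
        = (List.range groups.length).map (fun i => (groups.getD i [], groupSpaces.getD i [])) := by
  induction groups with
  | nil => intro gs _; rfl
  | cons g tl ih =>
      intro gs hlen
      cases gs with
      | nil => simp at hlen
      | cons s stl =>
          simp only [List.zip_cons_cons, List.length_cons, List.range_succ_eq_map,
            List.map_cons, List.map_map]
          congr 1
          rw [ih stl (by simpa using hlen)]
          rfl

lemma pvStepA_nonneg (groups groupSpaces : List (List (Int × Int))) (st : Int × (Int × Int)) (i : Nat)
    (h : 0 ≤ st.1) : 0 ≤ (pvStepA groups groupSpaces st i).1 := by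
  unfold pvStepA; dsimp only; split_ifs with hc
  · positivity
  · exact h

-- A's fold skips the non-candidate indices (the state stays ≥ 0 throughout)
lemma pvFold_filter (groups groupSpaces : List (List (Int × Int))) :
    ∀ (l : List Nat) (st : Int × (Int × Int)), 0 ≤ st.1 →
      l.foldl (pvStepA groups groupSpaces) st
        = (l.filter (fun i => pvCandB (groups.getD i [], groupSpaces.getD i []))).foldl
            (pvStepA groups groupSpaces) st := by
  intro l
  induction l with
  | nil => intro st _; rfl
  | cons i tl ih =>
      intro st hst
      by_cases hc : pvCandB (groups.getD i [], groupSpaces.getD i []) = true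
      · simp only [List.foldl_cons, List.filter_cons, hc, if_pos]
        exact ih _ (pvStepA_nonneg groups groupSpaces st i hst)
      · have hstep : pvStepA groups groupSpaces st i = st := by
          unfold pvStepA; dsimp only
          unfold pvCandB at hc
          simp only [Bool.and_eq_true, beq_iff_eq, Bool.not_eq_true', List.isEmpty_eq_false_iff,
            not_and, ne_eq] at hc
          split_ifs with hcond
          · exfalso
            rcases hcond with ⟨h1, h2⟩
            refine hc h1 ?_
            intro hnil
            rw [hnil] at h2
            simp at h2
            omega
          · rfl
        simp only [List.foldl_cons, List.filter_cons, hc, if_neg, Bool.false_eq_true,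
          not_false_eq_true, hstep]
        exact ih st hst

-- on a candidate index, A's step is the pair-level step on (group, liberty)
lemma pvStepA_eq_stepP (groups groupSpaces : List (List (Int × Int))) (st : Int × (Int × Int))
    (i : Nat) (hc : pvCandB (groups.getD i [], groupSpaces.getD i []) = true) :
    pvStepA groups groupSpaces st i = pvStepP st (pvMk (groups.getD i [], groupSpaces.getD i [])) := by
  unfold pvCandB at hc
  simp only [Bool.and_eq_true, beq_iff_eq] at hc
  unfold pvStepA pvStepP pvMk
  dsimp only
  rw [hc.1]
  by_cases hlt : st.1 < ((groups.getD i []).length : Int)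
  · rw [if_pos ⟨rfl, hlt⟩, if_pos hlt]
  · rw [if_neg (fun h => hlt h.2), if_neg hlt]

-- running A's pair step from a pair state computes the first-maximal pair
lemma pvFold_run : ∀ (cs : List ((List (Int × Int)) × (Int × Int))) (c : (List (Int × Int)) × (Int × Int)),
    cs.foldl pvStepP (((c.1.length : Int)), (c.2.2, c.2.1))
      = (((pvBest c cs).1.length : Int), ((pvBest c cs).2.2, (pvBest c cs).2.1)) := by
  intro cs
  induction cs with
  | nil => intro c; rfl
  | cons x tl ih =>
      intro c
      simp only [List.foldl_cons]
      unfold pvBest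
      simp only [List.foldl_cons]
      by_cases hlt : c.1.length < x.1.length
      · have : pvStepP (((c.1.length : Int)), (c.2.2, c.2.1)) x
            = (((x.1.length : Int)), (x.2.2, x.2.1)) := by
          unfold pvStepP; dsimp only; rw [if_pos (by exact_mod_cast hlt)]
        rw [this, if_pos hlt]
        exact ih x
      · have : pvStepP (((c.1.length : Int)), (c.2.2, c.2.1)) x
            = (((c.1.length : Int)), (c.2.2, c.2.1)) := by
          unfold pvStepP; dsimp only
          rw [if_neg (fun h => hlt (by exact_mod_cast h))]
        rw [this, if_neg hlt]
        exact ih c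

-- one step of PySem's insertion sort, written out
lemma pvInsert_cons (bef : ((List (Int × Int)) × (Int × Int)) → ((List (Int × Int)) × (Int × Int)) → Bool)
    (x h : (List (Int × Int)) × (Int × Int)) (r : List ((List (Int × Int)) × (Int × Int))) :
    PySem.List.insertBy bef x (h :: r)
      = if bef x h then x :: h :: r else h :: PySem.List.insertBy bef x r := rfl

-- head of the insertion fold (PySem's stable sort) is the first-maximal pair
lemma pvSorted_head : ∀ (cs : List ((List (Int × Int)) × (Int × Int)))
    (h : (List (Int × Int)) × (Int × Int)) (r : List ((List (Int × Int)) × (Int × Int))),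
    (cs.foldl (fun acc x =>
        PySem.List.insertBy (fun a b => decide ((-(a.1.length : Int)) < (-(b.1.length : Int)))) x acc)
      (h :: r)).head? = some (pvBest h cs) := by
  intro cs
  induction cs with
  | nil => intro h r; rfl
  | cons x tl ih =>
      intro h r
      simp only [List.foldl_cons]
      unfold pvBest
      simp only [List.foldl_cons]
      by_cases hlt : h.1.length < x.1.length
      · rw [pvInsert_cons, if_pos (by simp; exact_mod_cast hlt), if_pos hlt]
        exact ih x (h :: r)
      · rw [pvInsert_cons, if_neg (by simp; exact_mod_cast Nat.not_lt.mp hlt), if_neg hlt]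
        exact ih h _

lemma pvA_eq_range (groups groupSpaces : List (List (Int × Int))) :
    findRemovalPoint groups groupSpaces
      = ((List.range groups.length).foldl (pvStepA groups groupSpaces) (0, (-1, -1))).2 := by
  unfold findRemovalPoint
  rw [PySem.List.pyRange_zero_natCast, List.foldl_map]
  congr 1
  apply PySem.List.foldl_congr_mem
  intro acc x _
  unfold pvStepA
  simp [PySem.List.pyGetD_natCast]

-- A-side: the whole pair-level fold from the initial state
lemma pvA_side (c : (List (Int × Int)) × (Int × Int)) (cs : List ((List (Int × Int)) × (Int × Int)))
    (h : 0 < c.1.length) :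
    ((c :: cs).foldl pvStepP (0, (-1, -1))).2 = ((pvBest c cs).2.2, (pvBest c cs).2.1) := by
  simp only [List.foldl_cons]
  have hfirst : pvStepP (0, (-1, -1)) c = (((c.1.length : Int)), (c.2.2, c.2.1)) := by
    unfold pvStepP; dsimp only; rw [if_pos (by exact_mod_cast h)]
  rw [hfirst, pvFold_run cs c]

-- B-side: head of the insertion fold over the candidates
lemma pvB_side (c : (List (Int × Int)) × (Int × Int)) (cs : List ((List (Int × Int)) × (Int × Int))) :
    ((c :: cs).foldl (fun acc x =>
        PySem.List.insertBy (fun a b => decide ((-(a.1.length : Int)) < (-(b.1.length : Int)))) x acc)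
      []).head? = some (pvBest c cs) := by
  simp only [List.foldl_cons]
  exact pvSorted_head cs c []

-- ===== VERDICT (by name: the statement is the Claim_ definition above) =====
theorem findRemovalPoint_spec : Claim_equal_findRemovalPoint := by
  intro groups groupSpaces _ hpre
  unfold Spec_findRemovalPoint
  have hBdef : findRemovalPoint_alt groups groupSpaces
      = (match PySem.List.sorted
            (((List.range groups.length).filter
                (fun i => pvCandB (groups.getD i [], groupSpaces.getD i []))).map
              (fun i => pvMk (groups.getD i [], groupSpaces.getD i [])))
            (fun t => -(t.1.length : Int)) with
         | [] => ((-1 : Int), (-1 : Int))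
         | t :: _ => (t.2.2, t.2.1)) := by
    unfold findRemovalPoint_alt
    rw [pv_zip_eq_range_map groups groupSpaces hpre, List.filter_map, List.map_map]
    rfl
  rw [hBdef, pvA_eq_range, pvFold_filter groups groupSpaces _ _ (by norm_num)]
  rw [PySem.List.sorted_eq_foldl_insertBy, List.foldl_map]
  cases hE : (List.range groups.length).filter
      (fun i => pvCandB (groups.getD i [], groupSpaces.getD i [])) with
  | nil => rfl
  | cons c cs =>
      have hall : ∀ i ∈ c :: cs, pvCandB (groups.getD i [], groupSpaces.getD i []) = true := by
        intro i hi
        have hi' : i ∈ (List.range groups.length).filter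
            (fun i => pvCandB (groups.getD i [], groupSpaces.getD i [])) := hE ▸ hi
        exact (List.mem_filter.mp hi').2
      -- A's fold over the candidate indices is the pair-level fold over the mapped pairs
      have hA : (c :: cs).foldl (pvStepA groups groupSpaces) (0, (-1, -1))
          = ((c :: cs).map (fun i => pvMk (groups.getD i [], groupSpaces.getD i []))).foldl
              pvStepP (0, (-1, -1)) := by
        rw [List.foldl_map]
        exact PySem.List.foldl_congr_mem _ _ _ _
          (fun acc x hx => pvStepA_eq_stepP groups groupSpaces acc x (hall x hx))
      rw [hA, ← List.foldl_map
        (f := fun i => pvMk (groups.getD i [], groupSpaces.getD i []))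
        (g := fun acc x =>
          PySem.List.insertBy (fun a b => decide ((-(a.1.length : Int)) < (-(b.1.length : Int)))) x acc)]
      have hcc := hall c (List.mem_cons_self)
      unfold pvCandB at hcc
      simp only [Bool.and_eq_true, beq_iff_eq, Bool.not_eq_true', List.isEmpty_eq_false_iff] at hcc
      have hpos : 0 < (pvMk (groups.getD c [], groupSpaces.getD c [])).1.length := by
        unfold pvMk; exact List.length_pos_of_ne_nil hcc.2
      simp only [List.map_cons]
      rw [pvA_side _ _ hpos]
      have hfold := pvB_side (pvMk (groups.getD c [], groupSpaces.getD c []))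
        ((cs.map (fun i => pvMk (groups.getD i [], groupSpaces.getD i []))))
      cases hR : (pvMk (groups.getD c [], groupSpaces.getD c [])
            :: cs.map (fun i => pvMk (groups.getD i [], groupSpaces.getD i []))).foldl
          (fun acc x =>
            PySem.List.insertBy (fun a b => decide ((-(a.1.length : Int)) < (-(b.1.length : Int)))) x acc)
          [] with
      | nil => rw [hR] at hfold; simp at hfold
      | cons t rest =>
          rw [hR] at hfold
          simp only [List.head?_cons, Option.some.injEq] at hfold
          rw [hfold]
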